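-- pv_equiv track=rewrite | github.com/sociedade-do-pastel/simple3 | lexer/afds.py | afd_var
-- ===== SOURCE A (Python) =====
-- def afd_var(lex):
--     """
--     Função que verifica uma variável através de seu autômato
--
--     Argumentos:
--         lex - Lexema a ser testado
--
--     Retorno:
--         - Sucesso: ('var', lex)
--         _ Falha: None
--     """
--     afd = {
--         0: {'a': 1,  'b': 1,  'c': 1,  'd': 1,  'e': 1,  'f': 1,  'g': 1,  'h': 1,  'i': 1,  'j': 1,
--             'k': 1,  'l': 1,  'm': 1,  'n': 1,  'o': 1,  'p': 1,  'q': 1,  'r': 1,  's': 1,  't': 1,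
--             'u': 1,  'v': 1,  'w': 1,  'x': 1,  'y': 1,  'z': 1,  'A': 1,  'B': 1,  'C': 1,  'D': 1,
--             'E': 1,  'F': 1,  'G': 1,  'H': 1,  'I': 1,  'J': 1,  'K': 1,  'L': 1,  'M': 1,  'N': 1,
--             'O': 1,  'P': 1,  'Q': 1,  'R': 1,  'S': 1,  'T': 1,  'U': 1,  'V': 1,  'W': 1,  'X': 1,
--             'Y': 1,  'Z': 1},
--         1: {'a': 2,  'b': 2,  'c': 2,  'd': 2,  'e': 2,  'f': 2,  'g': 2,  'h': 2,  'i': 2,  'j': 2,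
--             'k': 2,  'l': 2,  'm': 2,  'n': 2,  'o': 2,  'p': 2,  'q': 2,  'r': 2,  's': 2,  't': 2,
--             'u': 2,  'v': 2,  'w': 2,  'x': 2,  'y': 2,  'z': 2,  'A': 2,  'B': 2,  'C': 2,  'D': 2,
--             'E': 2,  'F': 2,  'G': 2,  'H': 2,  'I': 2,  'J': 2,  'K': 2,  'L': 2,  'M': 2,  'N': 2,
--             'O': 2,  'P': 2,  'Q': 2,  'R': 2,  'S': 2,  'T': 2,  'U': 2,  'V': 2,  'W': 2,  'X': 2,
--             'Y': 2,  'Z': 2},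
--         2: {'a': 3,  'b': 3,  'c': 3,  'd': 3,  'e': 3,  'f': 3,  'g': 3,  'h': 3,  'i': 3,  'j': 3,
--             'k': 3,  'l': 3,  'm': 3,  'n': 3,  'o': 3,  'p': 3,  'q': 3,  'r': 3,  's': 3,  't': 3,
--             'u': 3,  'v': 3,  'w': 3,  'x': 3,  'y': 3,  'z': 3,  'A': 3,  'B': 3,  'C': 3,  'D': 3,
--             'E': 3,  'F': 3,  'G': 3,  'H': 3,  'I': 3,  'J': 3,  'K': 3,  'L': 3,  'M': 3,  'N': 3,
--             'O': 3,  'P': 3,  'Q': 3,  'R': 3,  'S': 3,  'T': 3,  'U': 3,  'V': 3,  'W': 3,  'X': 3,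
--             'Y': 3,  'Z': 3},
--         3: {}
--     }
--     final_states = [3]
--     current_state = 0
--
--     for word in str(lex):
--         current_state = afd[current_state].get(word)
--         if current_state is None:
--             return None
--
--     if current_state in final_states:
--         return ('var', lex)
-- ===== SOURCE B (Python) =====
-- def afd_var(lex):
--     s = str(lex)
--     if len(s) == 3 and all(('a' <= ch <= 'z') or ('A' <= ch <= 'Z') for ch in s):
--         return ('var', lex)
--     return None
-- ===== Notes on version B (the rewrite author's own statement) =====
-- stated objective: simpler
-- what changed: Replaced the 4-state DFA with its explicit 52-key transition dicts by a direct check: length == 3 and every character in the two ASCII letter ranges.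
import Mathlib
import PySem

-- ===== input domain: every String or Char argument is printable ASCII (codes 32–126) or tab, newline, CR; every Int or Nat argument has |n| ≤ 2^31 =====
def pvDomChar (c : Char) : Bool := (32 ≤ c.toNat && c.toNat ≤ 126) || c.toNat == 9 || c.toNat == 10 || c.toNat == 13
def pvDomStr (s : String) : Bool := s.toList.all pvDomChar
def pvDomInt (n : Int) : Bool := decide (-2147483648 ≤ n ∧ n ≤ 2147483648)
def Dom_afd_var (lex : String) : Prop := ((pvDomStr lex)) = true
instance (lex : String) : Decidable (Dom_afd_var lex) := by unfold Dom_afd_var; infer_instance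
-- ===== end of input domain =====

-- B replaces A's explicit 4-state DFA with its 52-key transition dicts by a direct "length is 3 and every char is an ASCII letter" check (objective: simpler).


-- ===== PORT A =====
-- the 52 keys shared by the inner dicts of states 0,1,2 (each maps every ASCII letter to state+1)
def afdLetters : List Char := ['a', 'b', 'c', 'd', 'e', 'f', 'g', 'h', 'i', 'j', 'k', 'l', 'm', 'n', 'o', 'p', 'q', 'r', 's', 't', 'u', 'v', 'w', 'x', 'y', 'z', 'A', 'B', 'C', 'D', 'E', 'F', 'G', 'H', 'I', 'J', 'K', 'L', 'M', 'N', 'O', 'P', 'Q', 'R', 'S', 'T', 'U', 'V', 'W', 'X', 'Y', 'Z']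
def afdGet (state : Int) (c : Char) : Option Int :=
  if state = 0 then (if afdLetters.contains c then some 1 else none)
  else if state = 1 then (if afdLetters.contains c then some 2 else none)
  else if state = 2 then (if afdLetters.contains c then some 3 else none)
  else none
def afdLoop (state : Int) (cs : List Char) : Option Int :=
  match cs with
  | [] => some state
  | c :: rest =>
    match afdGet state c with
    | none => none
    | some s' => afdLoop s' rest
def afd_var (lex : String) : Option (String × String) :=
  match afdLoop 0 lex.toList with
  | none => none
  | some s => if s ∈ ([3] : List Int) then some ("var", lex) else none

-- ===== PORT B =====
-- the range test 'a' <= ch <= 'z' or 'A' <= ch <= 'Z' from Source B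
def isAsciiLetterB (c : Char) : Bool := ('a' ≤ c && c ≤ 'z') || ('A' ≤ c && c ≤ 'Z')

def afd_var_alt (lex : String) : Option (String × String) :=
  if lex.toList.length = 3 && lex.toList.all isAsciiLetterB then some ("var", lex) else none

-- ===== PRECONDITION & SPEC =====
def Spec_afd_var (lex : String) (out : Option (String × String)) : Prop := out = afd_var_alt lex
instance (lex : String) (out : Option (String × String)) : Decidable (Spec_afd_var lex out) := by unfold Spec_afd_var; infer_instance

-- ===== CLAIM (what is proved, stated in full; the proofs are below) =====
def Claim_equal_afd_var : Prop := ∀ (lex : String), Dom_afd_var lex → Spec_afd_var lex (afd_var lex)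

-- ===== LEMMAS AND PROOFS =====
theorem mem_letters (c : Char) : c ∈ afdLetters ↔ isAsciiLetterB c = true := by
  simp only [afdLetters, List.mem_cons, List.not_mem_nil, or_false, isAsciiLetterB,
    Bool.or_eq_true, Bool.and_eq_true, decide_eq_true_eq, Char.ext_iff, Char.le_def,
    UInt32.le_iff_toNat_le, UInt32.ext_iff, show ('a' : Char).val.toNat = 97 from rfl, show ('b' : Char).val.toNat = 98 from rfl, show ('c' : Char).val.toNat = 99 from rfl, show ('d' : Char).val.toNat = 100 from rfl, show ('e' : Char).val.toNat = 101 from rfl, show ('f' : Char).val.toNat = 102 from rfl, show ('g' : Char).val.toNat = 103 from rfl, show ('h' : Char).val.toNat = 104 from rfl, show ('i' : Char).val.toNat = 105 from rfl, show ('j' : Char).val.toNat = 106 from rfl, show ('k' : Char).val.toNat = 107 from rfl, show ('l' : Char).val.toNat = 108 from rfl, show ('m' : Char).val.toNat = 109 from rfl, show ('n' : Char).val.toNat = 110 from rfl, show ('o' : Char).val.toNat = 111 from rfl, show ('p' : Char).val.toNat = 112 from rfl, show ('q' : Char).val.toNat = 113 from rfl, show ('r' : Char).val.toNat = 114 from rfl,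 show ('s' : Char).val.toNat = 115 from rfl, show ('t' : Char).val.toNat = 116 from rfl, show ('u' : Char).val.toNat = 117 from rfl, show ('v' : Char).val.toNat = 118 from rfl, show ('w' : Char).val.toNat = 119 from rfl, show ('x' : Char).val.toNat = 120 from rfl, show ('y' : Char).val.toNat = 121 from rfl, show ('z' : Char).val.toNat = 122 from rfl, show ('A' : Char).val.toNat = 65 from rfl, show ('B' : Char).val.toNat = 66 from rfl, show ('C' : Char).val.toNat = 67 from rfl, show ('D' : Char).val.toNat = 68 from rfl, show ('E' : Char).val.toNat = 69 from rfl, show ('F' : Char).val.toNat = 70 from rfl, show ('G' : Char).val.toNat = 71 from rfl, show ('H' : Char).val.toNat = 72 from rfl, show ('I' : Char).val.toNat = 73 from rfl, show ('J' : Char).val.toNat = 74 from rfl, show ('K' : Char).val.toNat = 75 from rfl, show ('L' : Char).val.toNat = 76 from rfl, show ('M' : Char).val.toNat = 77 from rfl, show ('N' : Char).val.toNat = 78 from rfl, show ('O' : Char).val.toNat = 79 from rfl, show ('P' : Char).val.toNat = 80 from rfl, show ('Q' : Char).val.toNat = 81 from rfl, show ('R' : Char).val.toNat = 82 from rfl,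 show ('S' : Char).val.toNat = 83 from rfl, show ('T' : Char).val.toNat = 84 from rfl, show ('U' : Char).val.toNat = 85 from rfl, show ('V' : Char).val.toNat = 86 from rfl, show ('W' : Char).val.toNat = 87 from rfl, show ('X' : Char).val.toNat = 88 from rfl, show ('Y' : Char).val.toNat = 89 from rfl, show ('Z' : Char).val.toNat = 90 from rfl]
  omega

theorem letters_contains (c : Char) : afdLetters.contains c = isAsciiLetterB c := by
  cases hb : isAsciiLetterB c
  · have h : ¬ c ∈ afdLetters := fun hm => by simpa [hb] using (mem_letters c).1 hm
    simp [List.contains_eq_mem, h]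
  · simp [List.contains_eq_mem, (mem_letters c).2 hb]

theorem afdGet_0 (c : Char) : afdGet 0 c = if isAsciiLetterB c then some 1 else none := by
  unfold afdGet; simp only [letters_contains]; norm_num
theorem afdGet_1 (c : Char) : afdGet 1 c = if isAsciiLetterB c then some 2 else none := by
  unfold afdGet; simp only [letters_contains]; norm_num
theorem afdGet_2 (c : Char) : afdGet 2 c = if isAsciiLetterB c then some 3 else none := by
  unfold afdGet; simp only [letters_contains]; norm_num
theorem afdGet_3 (c : Char) : afdGet 3 c = none := by
  unfold afdGet; norm_num

theorem afd_var_eq_alt (lex : String) : afd_var lex = afd_var_alt lex := by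
  unfold afd_var afd_var_alt
  match h : lex.toList with
  | [] => simp [afdLoop]
  | [a] =>
    by_cases ha : isAsciiLetterB a <;>
      simp [afdLoop, afdGet_0, ha]
  | [a, b] =>
    by_cases ha : isAsciiLetterB a <;> by_cases hb : isAsciiLetterB b <;>
      simp [afdLoop, afdGet_0, afdGet_1, ha, hb]
  | [a, b, c] =>
    by_cases ha : isAsciiLetterB a <;> by_cases hb : isAsciiLetterB b <;>
      by_cases hc : isAsciiLetterB c <;>
      simp [afdLoop, afdGet_0, afdGet_1, afdGet_2, ha, hb, hc]
  | a :: b :: c :: d :: rest =>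
    by_cases ha : isAsciiLetterB a <;> by_cases hb : isAsciiLetterB b <;>
      by_cases hc : isAsciiLetterB c <;>
      simp [afdLoop, afdGet_0, afdGet_1, afdGet_2, afdGet_3, ha, hb, hc]

-- ===== VERDICT (by name: the statement is the Claim_ definition above) =====
theorem afd_var_spec : Claim_equal_afd_var := by
  intro lex _
  unfold Spec_afd_var
  exact afd_var_eq_alt lex
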